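-- pv_equiv track=rewrite | github.com/sudipshil9862/csv-utility | csv_utils.py | is_special_palindrome
-- ===== SOURCE A (Python) =====
-- def is_special_palindrome(value):
--     #checking if the value is a palindrome and uses only A, D, V, B, N
--     valid_chars = set("ADVBN")
--     value = value.upper()
--
--     if not value.isalpha():
--         return False
--     if value != value[::-1]:
--         return False
--     return all(char in valid_chars for char in value)
-- ===== SOURCE B (Python) =====
-- def is_special_palindrome(value):
--     v = value.upper()
--     n = len(v)
--     if n == 0:
--         return False
--     i, j = 0, n - 1
--     while i <= j:
--         if v[i] not in "ADVBN" or v[j] not in "ADVBN" or v[i] != v[j]: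
--             return False
--         i += 1
--         j -= 1
--     return True
-- ===== Notes on version B (the rewrite author's own statement) =====
-- stated objective: alternative
-- what changed: A makes three separate full scans (isalpha check, comparison against a reversed copy, then a membership scan over a set); B does one two-pointer pass from both ends that checks membership of both chars and their equality at once, with an explicit empty-string guard.
import Mathlib
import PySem

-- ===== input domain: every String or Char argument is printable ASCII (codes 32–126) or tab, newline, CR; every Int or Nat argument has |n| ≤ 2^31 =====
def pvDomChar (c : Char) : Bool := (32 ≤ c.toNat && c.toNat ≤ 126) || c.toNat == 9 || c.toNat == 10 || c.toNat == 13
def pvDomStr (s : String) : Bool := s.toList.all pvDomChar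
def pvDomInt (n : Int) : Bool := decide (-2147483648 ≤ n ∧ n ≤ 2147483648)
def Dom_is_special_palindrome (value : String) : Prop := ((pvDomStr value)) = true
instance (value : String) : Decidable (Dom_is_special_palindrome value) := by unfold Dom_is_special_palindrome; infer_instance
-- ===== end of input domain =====

-- B replaces A's three separate scans (isalpha, reversed-copy comparison, membership scan)
-- by one two-pointer pass from both ends; objective: alternative single-pass decomposition.

-- ===== PORT A =====
def is_special_palindrome (value : String) : Bool :=
  let valid_chars : PySem.Set Char := PySem.Set.ofList "ADVBN".toList
  let v := PySem.Str.upper value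
  if !(PySem.Str.strIsalpha v) then false
  else if v ≠ (PySem.Str.slice? v none none (-1)).getD v then false
  else v.toList.all (fun c => PySem.Set.contains valid_chars c)

-- ===== PORT B =====
def pvMem (c : Char) : Bool := "ADVBN".toList.contains c

def pvLoop (cs : List Char) (i j : Nat) : Bool :=
  if h : i ≤ j then
    let a := cs.getD i ' '
    let b := cs.getD j ' '
    if !pvMem a || !pvMem b || a != b then false
    else pvLoop cs (i + 1) (j - 1)
  else true
termination_by j + 1 - i
decreasing_by omega

def is_special_palindrome_alt (value : String) : Bool :=
  let v := (PySem.Str.upper value).toList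
  let n := v.length
  if n = 0 then false
  else pvLoop v 0 (n - 1)

-- ===== PRECONDITION & SPEC =====
def Spec_is_special_palindrome (value : String) (out : Bool) : Prop := out = is_special_palindrome_alt value
instance (value : String) (out : Bool) : Decidable (Spec_is_special_palindrome value out) := by unfold Spec_is_special_palindrome; infer_instance

-- ===== CLAIM (what is proved, stated in full; the proofs are below) =====
def Claim_equal_is_special_palindrome : Prop := ∀ (value : String), Dom_is_special_palindrome value → Spec_is_special_palindrome value (is_special_palindrome value)

-- ===== LEMMAS AND PROOFS =====

lemma pvChars : "ADVBN".toList = ['A', 'D', 'V', 'B', 'N'] := by decide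

lemma pvSet : PySem.Set.ofList "ADVBN".toList = "ADVBN".toList := by decide

lemma pvMem_isalpha (c : Char) (h : pvMem c = true) : PySem.Chars.isalpha c = true := by
  have h' : c ∈ ['A', 'D', 'V', 'B', 'N'] := by
    rw [pvMem, pvChars] at h; simpa using h
  simp only [List.mem_cons, List.not_mem_nil, or_false] at h'
  rcases h' with h | h | h | h | h <;> subst h <;> decide

-- l is its own reverse iff each position equals its mirror position
lemma pal_iff (l : List Char) :
    l.reverse = l ↔ ∀ k, (h : k < l.length) → l[k] = l.getD (l.length - 1 - k) ' ' := by
  constructor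
  · intro hr k hk
    have h2 := List.getElem_reverse (l := l) (i := k) (by simpa using hk)
    rw [List.getElem_of_eq hr] at h2
    rw [h2, List.getD_eq_getElem _ _ (by omega)]
  · intro h
    apply List.ext_getElem (by simp)
    intro k hk _
    rw [List.getElem_reverse]
    rw [h (l.length - 1 - k) (by omega), List.getD_eq_getElem _ _ (by omega)]
    congr 1
    omega

-- the two-pointer loop succeeds iff every index in [i, j] holds a valid char equal to its mirror
lemma pvLoop_iff (d : Nat) : ∀ (cs : List Char) (i j : Nat), j + 1 - i ≤ d →
    (pvLoop cs i j = true ↔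
      ∀ k, i ≤ k → k ≤ j → pvMem (cs.getD k ' ') = true ∧ cs.getD k ' ' = cs.getD (i + j - k) ' ') := by
  induction d with
  | zero =>
    intro cs i j hd
    rw [pvLoop]
    simp only [dif_neg (by omega : ¬ i ≤ j)]
    constructor
    · intro _ k h1 h2; omega
    · intro _; trivial
  | succ d ih =>
    intro cs i j hd
    by_cases hij : i ≤ j
    · rw [pvLoop]
      simp only [dif_pos hij]
      by_cases hfail : (!pvMem (cs.getD i ' ') || !pvMem (cs.getD j ' ') || cs.getD i ' ' != cs.getD j ' ') = true
      · rw [if_pos hfail]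
        simp only [Bool.false_eq_true, false_iff]
        intro hall
        obtain ⟨m1, e1⟩ := hall i le_rfl hij
        obtain ⟨m2, -⟩ := hall j hij le_rfl
        rw [(by omega : i + j - i = j)] at e1
        simp only [List.getD] at m2 e1
        simp [m2, e1] at hfail
      · rw [if_neg hfail]
        simp only [Bool.or_eq_true, Bool.not_eq_true', bne_iff_ne, not_or, not_not] at hfail
        obtain ⟨⟨ha0, hb0⟩, hab⟩ := hfail
        have ha : pvMem (cs.getD i ' ') = true := by simpa using ha0
        have hb : pvMem (cs.getD j ' ') = true := by simpa using hb0
        rw [ih cs (i + 1) (j - 1) (by omega)]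
        constructor
        · intro hrec k h1 h2
          by_cases hki : k = i
          · subst hki
            exact ⟨ha, by rw [(by omega : k + j - k = j)]; exact hab⟩
          · by_cases hkj : k = j
            · subst hkj
              exact ⟨hb, by rw [(by omega : i + k - k = i)]; exact hab.symm⟩
            · obtain ⟨m, e⟩ := hrec k (by omega) (by omega)
              refine ⟨m, ?_⟩
              rw [(by omega : (i + 1) + (j - 1) - k = i + j - k)] at e
              exact e
        · intro hall k h1 h2
          obtain ⟨m, e⟩ := hall k (by omega) (by omega)
          refine ⟨m, ?_⟩
          rw [(by omega : (i + 1) + (j - 1) - k = i + j - k)]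
          exact e
    · rw [pvLoop]
      simp only [dif_neg hij]
      constructor
      · intro _ k h1 h2; omega
      · intro _; trivial

-- on a nonempty list the loop from both ends decides "all chars valid and palindrome"
lemma pvBridge (l : List Char) (hne : l ≠ []) :
    pvLoop l 0 (l.length - 1) = true ↔ ((∀ c ∈ l, pvMem c = true) ∧ l.reverse = l) := by
  have hn : 0 < l.length := List.length_pos_iff.mpr hne
  rw [pvLoop_iff l.length l 0 (l.length - 1) (by omega)]
  constructor
  · intro h
    constructor
    · intro c hc
      obtain ⟨k, hk, rfl⟩ := List.mem_iff_getElem.mp hc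
      have := (h k (Nat.zero_le k) (by omega)).1
      rwa [List.getD_eq_getElem _ _ hk] at this
    · rw [pal_iff]
      intro k hk
      have := (h k (Nat.zero_le k) (by omega)).2
      rw [List.getD_eq_getElem _ _ hk, (by omega : 0 + (l.length - 1) - k = l.length - 1 - k)] at this
      exact this
  · rintro ⟨hm, hp⟩ k h0 hk
    have hklt : k < l.length := by omega
    refine ⟨?_, ?_⟩
    · rw [List.getD_eq_getElem _ _ hklt]
      exact hm _ (List.getElem_mem hklt)
    · rw [List.getD_eq_getElem _ _ hklt, (by omega : 0 + (l.length - 1) - k = l.length - 1 - k)]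
      exact (pal_iff l).mp hp k hklt

theorem pv_main (value : String) :
    is_special_palindrome value = is_special_palindrome_alt value := by
  rw [Bool.eq_iff_iff]
  unfold is_special_palindrome is_special_palindrome_alt
  simp only [PySem.Str.strIsalpha_eq, PySem.Chars.strIsalpha,
    PySem.Str.slice?_none_none_neg_one, Option.getD_some, pvSet]
  set v := PySem.Str.upper value with hv
  set l := v.toList with hl
  by_cases hE : l = []
  · simp [hE]
  · have hn : 0 < l.length := List.length_pos_iff.mpr hE
    have hveq : (v ≠ String.ofList l.reverse) ↔ ¬ (l.reverse = l) := by
      simp only [ne_eq, String.ext_iff]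
      simp [← hl, eq_comm]
    rw [if_neg (show ¬ l.length = 0 by omega), pvBridge l hE]
    by_cases halpha : (!l.isEmpty && l.all PySem.Chars.isalpha) = true
    · rw [if_neg (by simp [halpha])]
      by_cases hpal : l.reverse = l
      · rw [if_neg (by simp only [hveq, not_not]; exact hpal)]
        simp only [List.all_eq_true]
        constructor
        · intro h
          exact ⟨fun c hc => by simpa [PySem.Set.contains, pvMem] using h c hc, hpal⟩
        · rintro ⟨hm, -⟩ c hc
          simpa [PySem.Set.contains, pvMem] using hm c hc
      · rw [if_pos (hveq.mpr hpal)]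
        simp only [Bool.false_eq_true, false_iff]
        rintro ⟨-, hp⟩
        exact hpal hp
    · rw [if_pos (by simp only [Bool.not_eq_true] at halpha; simp [halpha])]
      simp only [Bool.false_eq_true, false_iff]
      rintro ⟨hm, -⟩
      apply halpha
      simp only [Bool.and_eq_true, Bool.not_eq_true', List.isEmpty_eq_false_iff]
      exact ⟨hE, List.all_eq_true.mpr fun c hc => pvMem_isalpha c (hm c hc)⟩

-- ===== VERDICT (by name: the statement is the Claim_ definition above) =====
theorem is_special_palindrome_spec : Claim_equal_is_special_palindrome := by
  intro value _
  unfold Spec_is_special_palindrome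
  exact pv_main value
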